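-- pv_equiv track=rewrite | github.com/Lightbridge-KS/lb | lb/markdown/md_to_df_str.py | find_end_loc_by_heading
-- ===== SOURCE A (Python) =====
-- def find_end_loc_by_heading(x, h=1):
--     """
--     Find ending locations by headings.
--
--     Parameters
--     ----------
--     x : list of int
--         A list indicating heading levels per line.
--     h : int, optional
--         The specific heading level to process.
--
--     Returns
--     -------
--     list of int
--         A list with the ending line positions for each heading.
--     """
--     h_consider_set = [i for i, lv in enumerate(x) if lv <= h] + [len(x)]
--     h_loc = [i for i, lv in enumerate(x) if lv == h]
--
--     out = []
--     for loc in h_loc: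
--         end = next((i for i in h_consider_set if i > loc), len(x))
--         out.append(end - 1 if end < len(x) else end)
--
--     return out
-- ===== SOURCE B (Python) =====
-- def find_end_loc_by_heading(x, h=1):
--     """Single backward pass: maintain the nearest index >= i whose level is <= h."""
--     n = len(x)
--     out = []
--     nxt = n  # smallest index j > i with x[j] <= h, else n
--     for i in range(n - 1, -1, -1):
--         if x[i] == h:
--             out.append(nxt - 1 if nxt < n else n)
--         if x[i] <= h:
--             nxt = i
--     out.reverse()
--     return out
-- ===== Notes on version B (the rewrite author's own statement) =====
-- stated objective: faster
-- what changed: Replaces the per-heading linear scan of the consider-set with one backward pass that maintains the nearest following index of level <= h.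
import Mathlib
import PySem

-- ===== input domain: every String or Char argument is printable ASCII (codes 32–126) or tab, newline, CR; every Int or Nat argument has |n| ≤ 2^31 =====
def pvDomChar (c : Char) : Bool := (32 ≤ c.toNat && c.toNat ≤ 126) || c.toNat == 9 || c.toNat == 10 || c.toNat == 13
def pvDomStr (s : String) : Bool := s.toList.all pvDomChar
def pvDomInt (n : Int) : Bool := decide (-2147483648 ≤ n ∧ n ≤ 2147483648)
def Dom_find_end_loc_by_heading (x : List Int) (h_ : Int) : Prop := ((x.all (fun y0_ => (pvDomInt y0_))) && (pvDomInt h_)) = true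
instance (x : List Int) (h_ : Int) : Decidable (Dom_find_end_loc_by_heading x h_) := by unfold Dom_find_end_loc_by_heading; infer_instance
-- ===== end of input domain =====

-- B replaces A's per-heading scan of the consider-set by one backward pass that
-- maintains the nearest following index of level ≤ h (objective: faster, O(n) vs O(n^2)).

-- ===== PORT A =====
def find_end_loc_by_heading (x : List Int) (h_ : Int) : List Int :=
  let n : Int := x.length
  let h_consider_set : List Int :=
    (((PySem.List.enumerate x).filter (fun p => decide (p.2 ≤ h_))).map (fun p => p.1)) ++ [n]
  let h_loc : List Int :=
    ((PySem.List.enumerate x).filter (fun p => p.2 == h_)).map (fun p => p.1)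
  h_loc.map (fun loc =>
    let e := (h_consider_set.find? (fun i => decide (loc < i))).getD n
    if e < n then e - 1 else e)

-- ===== PORT B =====
-- foldr = the Python loop `for i in range(n-1,-1,-1)`: the last element is processed
-- first; consing to `out` here is Python's append-then-reverse.
def find_end_loc_by_heading_alt (x : List Int) (h_ : Int) : List Int :=
  let n : Int := x.length
  (x.foldr (fun a s =>
      let out := s.1
      let nxt := s.2.1
      let i := s.2.2
      let out := if a == h_ then (if nxt < n then nxt - 1 else n) :: out else out
      let nxt := if a ≤ h_ then i else nxt
      (out, nxt, i - 1))
    ([], n, n - 1)).1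

-- ===== PRECONDITION & SPEC =====
def Spec_find_end_loc_by_heading (x : List Int) (h_ : Int) (out : List Int) : Prop := out = find_end_loc_by_heading_alt x h_
instance (x : List Int) (h_ : Int) (out : List Int) : Decidable (Spec_find_end_loc_by_heading x h_ out) := by unfold Spec_find_end_loc_by_heading; infer_instance

-- ===== CLAIM (what is proved, stated in full; the proofs are below) =====
def Claim_equal_find_end_loc_by_heading : Prop := ∀ (x : List Int) (h_ : Int), Dom_find_end_loc_by_heading x h_ → Spec_find_end_loc_by_heading x h_ (find_end_loc_by_heading x h_)

-- ===== LEMMAS AND PROOFS =====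

-- consider-set of the suffix starting at offset i, with the sentinel n
def hcsF (h n : Int) : List Int → Int → List Int
  | [], _ => [n]
  | a :: t, i => if a ≤ h then i :: hcsF h n t (i + 1) else hcsF h n t (i + 1)

-- heading locations of the suffix starting at offset i
def hlF (h : Int) : List Int → Int → List Int
  | [], _ => []
  | a :: t, i => if a = h then i :: hlF h t (i + 1) else hlF h t (i + 1)

-- the backward pass, written as a front recursion on the suffix at offset i
def goF (h n : Int) : List Int → Int → List Int × Int
  | [], _ => ([], n)
  | a :: t, i =>
    let r := goF h n t (i + 1)
    (if a = h then (if r.2 < n then r.2 - 1 else n) :: r.1 else r.1,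
     if a ≤ h then i else r.2)

theorem hcs_bridge (h n : Int) (x : List Int) (s : Int) :
    (((PySem.List.enumerate x s).filter (fun p => decide (p.2 ≤ h))).map (fun p => p.1)) ++ [n]
      = hcsF h n x s := by
  induction x generalizing s with
  | nil => simp [PySem.List.enumerate_nil, hcsF]
  | cons a t ih =>
    simp only [PySem.List.enumerate_cons, List.filter_cons, hcsF]
    by_cases hah : a ≤ h <;> simp [hah, ih]

theorem hl_bridge (h : Int) (x : List Int) (s : Int) :
    ((PySem.List.enumerate x s).filter (fun p => p.2 == h)).map (fun p => p.1)
      = hlF h x s := by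
  induction x generalizing s with
  | nil => simp [PySem.List.enumerate_nil, hlF]
  | cons a t ih =>
    simp only [PySem.List.enumerate_cons, List.filter_cons, hlF]
    by_cases hah : a = h <;> simp [hah, ih]

theorem hl_ge (h : Int) (x : List Int) (i l : Int) (hl : l ∈ hlF h x i) : i ≤ l := by
  induction x generalizing i with
  | nil => simp [hlF] at hl
  | cons a t ih =>
    simp only [hlF] at hl
    by_cases hah : a = h
    · simp [hah] at hl
      rcases hl with rfl | hl
      · exact le_refl _
      · have := ih (i + 1) hl; omega
    · simp [hah] at hl
      have := ih (i + 1) hl; omega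

theorem goF_snd_le (h n : Int) (x : List Int) (i : Int) (hn : i + x.length ≤ n) :
    (goF h n x i).2 ≤ n := by
  induction x generalizing i with
  | nil => simp [goF]
  | cons a t ih =>
    have hn' : (i + 1) + (t.length : Int) ≤ n := by
      simp only [List.length_cons, Nat.cast_add, Nat.cast_one] at hn; omega
    have := ih (i + 1) hn'
    simp only [goF]
    by_cases hah : a ≤ h <;> simp [hah] <;> omega

theorem find_head (h n : Int) (x : List Int) (i l : Int) (h1 : l < i) (h2 : l < n) :
    (hcsF h n x i).find? (fun c => decide (l < c)) = some (goF h n x i).2 := by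
  induction x generalizing i with
  | nil => simp [hcsF, goF, h2]
  | cons a t ih =>
    by_cases hah : a ≤ h
    · simp [hcsF, goF, hah, h1]
    · simp only [hcsF, goF, hah, if_false]
      exact ih (i + 1) (by omega)

theorem find_skip (h n : Int) (a : Int) (t : List Int) (i l : Int) (h1 : i ≤ l) :
    (hcsF h n (a :: t) i).find? (fun c => decide (l < c))
      = (hcsF h n t (i + 1)).find? (fun c => decide (l < c)) := by
  by_cases hah : a ≤ h
  · simp only [hcsF, hah, if_true]
    rw [List.find?_cons]
    have hd : (decide (l < i)) = false := by simp; omega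
    rw [hd]
  · simp [hcsF, hah]

theorem main_lemma (h n : Int) (x : List Int) (i : Int) (hn : i + x.length ≤ n) :
    (goF h n x i).1 = (hlF h x i).map (fun l =>
      if ((hcsF h n x i).find? (fun c => decide (l < c))).getD n < n then
        ((hcsF h n x i).find? (fun c => decide (l < c))).getD n - 1
      else ((hcsF h n x i).find? (fun c => decide (l < c))).getD n) := by
  induction x generalizing i with
  | nil => simp [goF, hlF]
  | cons a t ih =>
    have hn' : (i + 1) + (t.length : Int) ≤ n := by
      simp only [List.length_cons, Nat.cast_add, Nat.cast_one] at hn; omega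
    have tail_eq : (hlF h t (i + 1)).map (fun l =>
        if ((hcsF h n (a :: t) i).find? (fun c => decide (l < c))).getD n < n then
          ((hcsF h n (a :: t) i).find? (fun c => decide (l < c))).getD n - 1
        else ((hcsF h n (a :: t) i).find? (fun c => decide (l < c))).getD n)
        = (goF h n t (i + 1)).1 := by
      rw [ih (i + 1) hn']
      apply List.map_congr_left
      intro l hl
      have hge : i + 1 ≤ l := hl_ge h t (i + 1) l hl
      rw [find_skip h n a t i l (by omega)]
    by_cases hah : a = h
    · subst hah
      have hfind : (hcsF a n (a :: t) i).find? (fun c => decide (i < c))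
          = some (goF a n t (i + 1)).2 := by
        rw [show hcsF a n (a :: t) i = i :: hcsF a n t (i + 1) by simp [hcsF]]
        rw [List.find?_cons]
        have hd : (decide (i < i)) = false := by simp
        rw [hd]
        exact find_head a n t (i + 1) i (by omega) (by omega)
      simp only [goF, hlF, if_true, List.map_cons]
      rw [tail_eq, hfind]
      have hle2 : (goF a n t (i + 1)).2 ≤ n := goF_snd_le a n t (i + 1) hn'
      simp only [Option.getD_some, List.cons.injEq, and_true]
      by_cases hlt : (goF a n t (i + 1)).2 < n
      · simp [hlt]
      · have : (goF a n t (i + 1)).2 = n := by omega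
        simp [this]
    · simp only [goF, hlF, hah, if_false]
      rw [tail_eq]

theorem fold_eq (h n : Int) (x : List Int) :
    x.foldr (fun a s =>
      let out := s.1
      let nxt := s.2.1
      let i := s.2.2
      let out := if a == h then (if nxt < n then nxt - 1 else n) :: out else out
      let nxt := if a ≤ h then i else nxt
      (out, nxt, i - 1)) ([], n, n - 1)
    = ((goF h n x (n - x.length)).1, (goF h n x (n - x.length)).2, n - x.length - 1) := by
  induction x with
  | nil => simp [goF]
  | cons a t ih =>
    simp only [List.foldr_cons, ih]
    have harith : n - ((a :: t).length : Int) + 1 = n - t.length := by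
      simp only [List.length_cons, Nat.cast_add, Nat.cast_one]; omega
    have hunf : goF h n (a :: t) (n - ((a :: t).length : Int))
        = (if a = h then (if (goF h n t (n - (t.length : Int))).2 < n then
              (goF h n t (n - (t.length : Int))).2 - 1 else n) :: (goF h n t (n - (t.length : Int))).1
            else (goF h n t (n - (t.length : Int))).1,
           if a ≤ h then n - ((a :: t).length : Int) else (goF h n t (n - (t.length : Int))).2) := by
      simp only [goF, harith]
    rw [hunf]
    have h2 : n - (((a :: t)).length : Int) = n - (t.length : Int) - 1 := by
      simp only [List.length_cons, Nat.cast_add, Nat.cast_one]; omega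
    rw [h2]
    simp only [beq_iff_eq]

-- ===== VERDICT (by name: the statement is the Claim_ definition above) =====
theorem find_end_loc_by_heading_spec : Claim_equal_find_end_loc_by_heading := by
  intro x h_ _
  unfold Spec_find_end_loc_by_heading find_end_loc_by_heading find_end_loc_by_heading_alt
  simp only [fold_eq, sub_self]
  rw [hcs_bridge, hl_bridge]
  rw [main_lemma h_ (x.length : Int) x 0 (by simp)]
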